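-- pv_equiv track=rewrite | github.com/eljost/pysisyphus | pysisyphus/wavefunction/helpers.py | cca_order
-- ===== SOURCE A (Python) =====
-- def cca_order(l):
--     """Same as canonical_order()."""
--     inds = [
--         (l, 0, 0),
--     ]
--     a = l
--     b = c = 0
--     for _ in range(((l + 1) * (l + 2) // 2) - 1):
--         if c < l - a:
--             b -= 1
--             c += 1
--         else:
--             a -= 1
--             c = 0
--             b = l - a
--         inds.append((a, b, c))
--     return inds
-- ===== SOURCE B (Python) =====
-- def cca_order(l):
--     """Same as canonical_order()."""
--     return [(a, b, l - a - b) for a in range(l, -1, -1) for b in range(l - a, -1, -1)]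
-- ===== Notes on version B (the rewrite author's own statement) =====
-- stated objective: simpler
-- what changed: Replaces the flat conditional state-machine loop with a precomputed iteration count by a direct nested comprehension over a descending and b descending with c = l-a-b.
-- outside the precondition, e.g. on cca_order(-1): A returns [(-1, 0, 0)], B returns []; on cca_order(-4): A returns [(-4, 0, 0), (-5, 1, 0), (-5, 0, 1)], B returns []
import Mathlib
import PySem

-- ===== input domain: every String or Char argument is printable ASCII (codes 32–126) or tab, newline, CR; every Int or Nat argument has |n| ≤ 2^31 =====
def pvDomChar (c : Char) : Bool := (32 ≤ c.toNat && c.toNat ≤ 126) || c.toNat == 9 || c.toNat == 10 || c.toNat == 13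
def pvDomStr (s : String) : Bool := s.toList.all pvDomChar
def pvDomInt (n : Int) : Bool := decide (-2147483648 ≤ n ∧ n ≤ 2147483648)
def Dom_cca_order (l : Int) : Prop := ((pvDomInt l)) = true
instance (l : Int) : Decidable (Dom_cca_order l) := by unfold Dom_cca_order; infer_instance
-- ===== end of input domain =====

-- B replaces A's conditional state-machine loop by the direct nested comprehension
-- (a descending, b descending, c = l - a - b); equivalence is proved on Pre_ (l ≥ 0).

-- ===== PORT A =====
-- the for-loop: n remaining iterations, loop variables a b c, and inds
-- (inds.append(x) is ported as Array.push, the dynamic-array append Python's list uses)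
def ccaLoop (l : Int) : ℕ → Int → Int → Int → Array (Int × Int × Int) → Array (Int × Int × Int)
  | 0, _, _, _, inds => inds
  | n + 1, a, b, c, inds =>
      if c < l - a then ccaLoop l n a (b - 1) (c + 1) (inds.push (a, b - 1, c + 1))
      else ccaLoop l n (a - 1) (l - (a - 1)) 0 (inds.push (a - 1, l - (a - 1), 0))

def cca_order (l : Int) : List (Int × Int × Int) :=
  -- for _ in range(((l+1)*(l+2)//2) - 1): a count-only loop
  (ccaLoop l ((PySem.Int.floordiv ((l + 1) * (l + 2)) 2 - 1).toNat) l 0 0 #[(l, 0, 0)]).toList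

-- ===== PORT B =====
def cca_order_alt (l : Int) : List (Int × Int × Int) :=
  (PySem.List.pyRange l (-1) (-1)).flatMap
    (fun a => (PySem.List.pyRange (l - a) (-1) (-1)).map (fun b => (a, b, l - a - b)))

-- ===== PRECONDITION & SPEC =====
-- Pre_ restricts to the natural domain l ≥ 0 (an angular momentum): for negative l A still
-- returns a list ([(l,0,0)], or leftover state-machine output such as cca_order(-4) =
-- [(-4,0,0),(-5,1,0),(-5,0,1)]), an accident of its loop-count formula; B returns [] there.
def Pre_cca_order (l : Int) : Prop := 0 ≤ l
instance (l : Int) : Decidable (Pre_cca_order l) := by unfold Pre_cca_order; infer_instance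
def pvWitness_cca_order : Int := (3)

def Spec_cca_order (l : Int) (out : List (Int × Int × Int)) : Prop := out = cca_order_alt l
instance (l : Int) (out : List (Int × Int × Int)) : Decidable (Spec_cca_order l out) := by
  unfold Spec_cca_order; infer_instance

-- ===== CLAIM (what is proved, stated in full; the proofs are below) =====
def Claim_equal_cca_order : Prop :=
  ∀ (l : Int), Dom_cca_order l → Pre_cca_order l → Spec_cca_order l (cca_order l)

-- ===== LEMMAS AND PROOFS =====

-- A's loop body as a step function on (state, emitted list) — proof-side mirror of ccaLoop
def ccaStep (l : Int) (s : (Int × Int × Int) × List (Int × Int × Int)) :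
    (Int × Int × Int) × List (Int × Int × Int) :=
  match s with
  | ((a, b, c), inds) =>
    if c < l - a then ((a, b - 1, c + 1), inds ++ [(a, b - 1, c + 1)])
    else ((a - 1, l - (a - 1), 0), inds ++ [(a - 1, l - (a - 1), 0)])

-- the array loop computes the iterate of the step function
theorem pv_ccaLoop_iterate (l : Int) :
    ∀ (n : ℕ) (a b c : Int) (inds : Array (Int × Int × Int)),
      (ccaLoop l n a b c inds).toList = ((ccaStep l)^[n] ((a, b, c), inds.toList)).2 := by
  intro n
  induction n with
  | zero => intro a b c inds; simp [ccaLoop]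
  | succ n ih =>
      intro a b c inds
      rw [Function.iterate_succ_apply]
      by_cases hc : c < l - a <;> simp [ccaLoop, ccaStep, hc, ih]

-- prepending a head to a map over range = a map over the longer range
theorem pv_cons_map_range {β : Type} (x : β) (f g : ℕ → β) (n : ℕ)
    (h0 : g 0 = x) (hs : ∀ k, k < n → g (k + 1) = f k) :
    x :: (List.range n).map f = (List.range (n + 1)).map g := by
  rw [List.range_succ_eq_map, List.map_cons, List.map_map, h0]
  refine congrArg _ ?_
  refine List.map_congr_left (fun k hk => ?_)
  exact (hs k (List.mem_range.mp hk)).symm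

-- the triples of one "row" (fixed a), in the common emitted order
def rowP (l a : Int) : List (Int × Int × Int) :=
  (List.range ((l - a + 1).toNat)).map (fun (k : ℕ) => (a, l - a - (k : Int), (k : Int)))

-- [A, A-1, ..., 0] as integers
def descL : ℕ → List Int
  | 0 => [0]
  | A + 1 => ((A + 1 : ℕ) : Int) :: descL A

theorem pv_descL_eq : ∀ (A : ℕ),
    descL A = (List.range (A + 1)).map (fun (k : ℕ) => ((A : Int) - (k : Int))) := by
  intro A
  induction A with
  | zero => simp [descL]
  | succ A ih =>
      rw [descL, ih]
      exact pv_cons_map_range _ _ _ _ (by norm_num) (fun k _ => by push_cast; ring)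

-- iterating the first branch n times (while staying inside the row)
theorem pv_row_iter (l : Int) :
    ∀ (n : ℕ) (a b c : Int) (inds : List (Int × Int × Int)), (n : Int) ≤ l - a - c →
      (ccaStep l)^[n] ((a, b, c), inds)
        = ((a, b - (n : Int), c + (n : Int)),
           inds ++ (List.range n).map
             (fun (k : ℕ) => (a, b - ((k : Int) + 1), c + ((k : Int) + 1)))) := by
  intro n
  induction n with
  | zero => intro a b c inds _; simp
  | succ n ih =>
      intro a b c inds h
      have hc : c < l - a := by push_cast at h; omega
      rw [Function.iterate_succ_apply]
      have hstep : ccaStep l ((a, b, c), inds)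
          = ((a, b - 1, c + 1), inds ++ [(a, b - 1, c + 1)]) := by
        simp [ccaStep, hc]
      rw [hstep, ih a (b - 1) (c + 1) (inds ++ [(a, b - 1, c + 1)]) (by push_cast at h ⊢; omega)]
      simp only [Prod.mk.injEq]
      refine ⟨⟨by trivial, by push_cast; ring, by push_cast; ring⟩, ?_⟩
      simp only [List.append_assoc, List.singleton_append]
      refine congrArg (inds ++ ·) ?_
      refine pv_cons_map_range _ _ _ n (by norm_num) (fun k _ => ?_)
      simp only [Prod.mk.injEq]
      exact ⟨by trivial, by push_cast; ring, by push_cast; ring⟩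

-- one full row, starting at its head (a, l-a, 0)
theorem pv_row_full (l a : Int) (_ha : 0 ≤ a) (hal : a ≤ l) (inds : List (Int × Int × Int)) :
    (ccaStep l)^[(l - a).toNat] ((a, l - a, 0), inds ++ [(a, l - a, 0)])
      = ((a, 0, l - a), inds ++ rowP l a) := by
  rw [pv_row_iter l ((l - a).toNat) a (l - a) 0 (inds ++ [(a, l - a, 0)]) (by omega)]
  simp only [Prod.mk.injEq]
  refine ⟨⟨by trivial, by omega, by omega⟩, ?_⟩
  unfold rowP
  have h2 : (l - a + 1).toNat = (l - a).toNat + 1 := by omega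
  rw [h2]
  simp only [List.append_assoc, List.singleton_append]
  refine congrArg (inds ++ ·) ?_
  refine pv_cons_map_range _ _ _ ((l - a).toNat) (by norm_num) (fun k _ => ?_)
  simp only [Prod.mk.injEq]
  exact ⟨by trivial, by push_cast; ring, by push_cast; ring⟩

-- number of loop iterations A spends finishing rows A, A-1, ..., 0 from a row start
def cntRows (l : Int) : ℕ → ℕ
  | 0 => l.toNat
  | A + 1 => (l - ((A : Int) + 1)).toNat + 1 + cntRows l A

theorem pv_rows_iter (l : Int) (hl : 0 ≤ l) :
    ∀ (A : ℕ) (inds : List (Int × Int × Int)), (A : Int) ≤ l →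
      (ccaStep l)^[cntRows l A]
          (((A : Int), l - (A : Int), 0), inds ++ [((A : Int), l - (A : Int), 0)])
        = ((0, 0, l), inds ++ (descL A).flatMap (rowP l)) := by
  intro A
  induction A with
  | zero =>
      intro inds _
      have h0 : cntRows l 0 = (l - (0 : Int)).toNat := by simp [cntRows]
      have hfull := pv_row_full l 0 (by omega) hl inds
      simp only [Nat.cast_zero]
      rw [h0, hfull]
      simp [descL]
  | succ A ih =>
      intro inds hA
      have hA' : (A : Int) + 1 ≤ l := by push_cast at hA; omega
      have hcnt : cntRows l (A + 1) = cntRows l A + (1 + (l - ((A : Int) + 1)).toNat) := by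
        simp [cntRows]; omega
      push_cast
      rw [hcnt, Function.iterate_add_apply, Function.iterate_add_apply]
      rw [pv_row_full l ((A : Int) + 1) (by omega) hA' inds]
      have e2 : (ccaStep l)^[1] (((A : Int) + 1, 0, l - ((A : Int) + 1)), inds ++ rowP l ((A : Int) + 1))
          = (((A : Int), l - (A : Int), 0),
             (inds ++ rowP l ((A : Int) + 1)) ++ [((A : Int), l - (A : Int), 0)]) := by
        have hne : ¬ (l - ((A : Int) + 1) < l - ((A : Int) + 1)) := by omega
        simp only [Function.iterate_one, ccaStep, if_neg hne]
        have ha1 : (A : Int) + 1 - 1 = (A : Int) := by ring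
        rw [ha1]
      rw [e2, ih (inds ++ rowP l ((A : Int) + 1)) (by omega)]
      have hdesc : descL (A + 1) = ((A : Int) + 1) :: descL A := by
        rw [descL]; push_cast; ring_nf
      rw [hdesc, List.flatMap_cons, List.append_assoc]

-- value of the iteration count, as an integer
theorem pv_cnt_val (l : Int) (hl : 0 ≤ l) :
    ∀ (A : ℕ), (A : Int) ≤ l →
      2 * ((cntRows l A : ℕ) : Int)
        = 2 * (A : Int) + 2 * ((A : Int) + 1) * l - (A : Int) * ((A : Int) + 1) := by
  intro A
  induction A with
  | zero => intro _; simp only [cntRows, Nat.cast_zero]; omega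
  | succ A ih =>
      intro hA
      have hA' : (A : Int) ≤ l := by push_cast at hA; omega
      have hih := ih hA'
      simp only [cntRows]
      push_cast
      rw [Int.toNat_of_nonneg (by push_cast at hA; omega : (0 : Int) ≤ l - ((A : Int) + 1))]
      linarith [hih]

-- A's range() argument equals the row-by-row count
theorem pv_loopcount (l : Int) (hl : 0 ≤ l) :
    (PySem.Int.floordiv ((l + 1) * (l + 2)) 2 - 1).toNat = cntRows l l.toNat := by
  have hL : ((l.toNat : ℕ) : Int) = l := Int.toNat_of_nonneg hl
  have h2 := pv_cnt_val l hl l.toNat (by omega)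
  rw [hL] at h2
  have hmul : (l + 1) * (l + 2) = 2 * (((cntRows l l.toNat : ℕ) : Int) + 1) := by
    linear_combination -h2
  rw [hmul, PySem.Int.floordiv_eq_ediv_of_pos (by norm_num : (0 : Int) < 2),
      Int.mul_ediv_cancel_left _ (by norm_num : (2 : Int) ≠ 0)]
  omega

-- B's nested pyRanges are exactly the same rows
theorem pv_alt_eq (l : Int) (hl : 0 ≤ l) :
    cca_order_alt l = (descL l.toNat).flatMap (rowP l) := by
  unfold cca_order_alt
  have hL : ((l.toNat : ℕ) : Int) = l := Int.toNat_of_nonneg hl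
  have houter : PySem.List.pyRange l (-1) (-1) = descL l.toNat := by
    rw [PySem.List.pyRange_neg_one, pv_descL_eq]
    have h1 : (l - (-1)).toNat = l.toNat + 1 := by omega
    rw [h1]
    refine List.map_congr_left (fun k _ => ?_)
    rw [hL]
  have hinner : (fun a => (PySem.List.pyRange (l - a) (-1) (-1)).map (fun b => (a, b, l - a - b)))
      = rowP l := by
    funext a
    rw [PySem.List.pyRange_neg_one, List.map_map]
    unfold rowP
    have h3 : l - a - (-1) = l - a + 1 := by ring
    rw [h3]
    refine List.map_congr_left (fun k _ => ?_)
    simp only [Function.comp_apply, Prod.mk.injEq]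
    exact ⟨by trivial, by trivial, by ring⟩
  rw [houter, hinner]

-- ===== VERDICT (by name: the statement is the Claim_ definition above) =====
theorem cca_order_spec : Claim_equal_cca_order := by
  intro l _ hpre
  unfold Spec_cca_order
  have hl : 0 ≤ l := hpre
  have hL : ((l.toNat : ℕ) : Int) = l := Int.toNat_of_nonneg hl
  have hmain := pv_rows_iter l hl l.toNat [] (by omega)
  rw [hL] at hmain
  simp only [sub_self, List.nil_append] at hmain
  unfold cca_order
  rw [pv_ccaLoop_iterate, pv_loopcount l hl]
  have harr : (#[(l, 0, 0)] : Array (Int × Int × Int)).toList = [(l, 0, 0)] := by rfl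
  rw [harr, hmain, pv_alt_eq l hl]
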